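-- pv_equiv track=rewrite | github.com/nicklasorte/spectrum-systems | spectrum_systems/modules/runtime/run_output_evaluation.py | classify_evaluation_failure
-- ===== SOURCE A (Python) =====
-- from typing import Any, Dict, List, Optional, Tuple
--
-- _FAILURE_PRIORITY: Dict[str, int] = {
--     "missing_output_file": 0,
--     "malformed_json": 1,
--     "schema_invalid": 2,
--     "normalization_error": 3,
--     "unsupported_study_type": 4,
--     "invalid_threshold_definition": 5,
--     "missing_required_metric": 6,
--     "semantic_incomplete": 7,
--     "none": 99,
-- }
--
-- def classify_evaluation_failure(findings: List[Dict[str, Any]]) -> Tuple[str, str]: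
--     """Classify the overall status and failure_type from *findings*.
--
--     Returns (overall_status, failure_type).
--     """
--     if not findings:
--         return "pass", "none"
--
--     has_error = any(f.get("severity") == "error" for f in findings)
--     has_warning = any(f.get("severity") == "warning" for f in findings)
--
--     # Map finding codes to failure_type
--     code_to_failure = {
--         "missing_output_file": "missing_output_file",
--         "malformed_json": "malformed_json",
--         "schema_invalid": "schema_invalid",
--         "semantic_incomplete": "semantic_incomplete",
--         "unsupported_study_type": "unsupported_study_type",
--         "missing_required_metric": "missing_required_metric",
--         "invalid_threshold_definition": "invalid_threshold_definition",
--         "normalization_error": "normalization_error",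
--     }
--
--     best_priority = 99
--     best_failure_type = "none"
--     for f in findings:
--         code = f.get("code", "")
--         ft = code_to_failure.get(code, "none")
--         priority = _FAILURE_PRIORITY.get(ft, 99)
--         if priority < best_priority:
--             best_priority = priority
--             best_failure_type = ft
--
--     if has_error:
--         return "fail", best_failure_type
--     if has_warning:
--         return "warning", "none"
--     return "pass", "none"
-- ===== SOURCE B (Python) =====
-- from typing import Any, Dict, List, Tuple
--
-- _FAILURE_PRIORITY: Dict[str, int] = {
--     "missing_output_file": 0,
--     "malformed_json": 1,
--     "schema_invalid": 2,
--     "normalization_error": 3,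
--     "unsupported_study_type": 4,
--     "invalid_threshold_definition": 5,
--     "missing_required_metric": 6,
--     "semantic_incomplete": 7,
--     "none": 99,
-- }
--
-- def classify_evaluation_failure(findings: List[Dict[str, Any]]) -> Tuple[str, str]:
--     """Classify the overall status and failure_type from *findings*.
--
--     Table-driven: collect the severities and codes into sets once, then scan
--     the fixed priority table (whose insertion order is ascending priority)
--     and take the FIRST table key present among the codes; no per-finding
--     minimum loop and no identity mapping are needed.
--     """
--     if not findings:
--         return "pass", "none"
--
--     severities = {f.get("severity") for f in findings}
--     codes = {f.get("code", "") for f in findings}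
--
--     failure_type = next((k for k in _FAILURE_PRIORITY if k in codes), "none")
--
--     if "error" in severities:
--         return "fail", failure_type
--     if "warning" in severities:
--         return "warning", "none"
--     return "pass", "none"
-- ===== Notes on version B (the rewrite author's own statement) =====
-- stated objective: alternative
-- what changed: Replaces A's per-finding minimum loop (and the redundant identity dict code_to_failure) with a table-driven scan: B collects the severities and codes into sets in two comprehensions, then takes the first key of _FAILURE_PRIORITY (whose insertion order is ascending priority) that occurs among the codes.
import Mathlib
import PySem

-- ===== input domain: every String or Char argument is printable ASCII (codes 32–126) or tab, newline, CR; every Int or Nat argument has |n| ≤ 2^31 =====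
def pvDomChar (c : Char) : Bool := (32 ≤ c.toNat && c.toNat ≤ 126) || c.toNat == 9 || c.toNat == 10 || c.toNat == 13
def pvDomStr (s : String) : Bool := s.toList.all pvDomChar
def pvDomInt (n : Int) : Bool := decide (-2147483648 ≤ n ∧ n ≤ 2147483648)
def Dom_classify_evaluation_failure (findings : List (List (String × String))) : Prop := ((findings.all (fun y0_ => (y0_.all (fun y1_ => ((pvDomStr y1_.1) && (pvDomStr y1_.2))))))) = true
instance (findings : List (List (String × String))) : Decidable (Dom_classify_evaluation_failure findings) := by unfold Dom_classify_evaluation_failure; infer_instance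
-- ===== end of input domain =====

-- B replaces A's per-finding minimum loop (plus the identity code dict) by a table scan:
-- collect severity/code SETS, then take the first key of the priority table present among the codes
-- (the table's insertion order is ascending priority).  Return value only; no side effects.

-- ===== PORT A =====
-- each finding dict is an association list; f.get(k) is first-match lookup
def pvGet (f : List (String × String)) (k : String) : Option String :=
  (PySem.Dict.mk f).get? k

def pvGetD (f : List (String × String)) (k d : String) : String :=
  (PySem.Dict.mk f).getD k d

def failurePriority : PySem.Dict String Int := PySem.Dict.mk
  [("missing_output_file", 0), ("malformed_json", 1), ("schema_invalid", 2),
   ("normalization_error", 3), ("unsupported_study_type", 4),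
   ("invalid_threshold_definition", 5), ("missing_required_metric", 6),
   ("semantic_incomplete", 7), ("none", 99)]

def codeToFailure : PySem.Dict String String := PySem.Dict.mk
  [("missing_output_file", "missing_output_file"), ("malformed_json", "malformed_json"),
   ("schema_invalid", "schema_invalid"), ("semantic_incomplete", "semantic_incomplete"),
   ("unsupported_study_type", "unsupported_study_type"),
   ("missing_required_metric", "missing_required_metric"),
   ("invalid_threshold_definition", "invalid_threshold_definition"),
   ("normalization_error", "normalization_error")]

-- code := f.get("code",""); ft := code_to_failure.get(code,"none"); priority := _FAILURE_PRIORITY.get(ft,99)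
def bestStepA (s : Int × String) (f : List (String × String)) : Int × String :=
  if failurePriority.getD (codeToFailure.getD (pvGetD f "code" "") "none") 99 < s.1 then
    (failurePriority.getD (codeToFailure.getD (pvGetD f "code" "") "none") 99,
     codeToFailure.getD (pvGetD f "code" "") "none")
  else s

def classify_evaluation_failure (findings : List (List (String × String))) : String × String :=
  if findings = [] then ("pass", "none")
  else
    let has_error := findings.any (fun f => pvGet f "severity" == some "error")
    let has_warning := findings.any (fun f => pvGet f "severity" == some "warning")
    let best := findings.foldl bestStepA (99, "none")
    if has_error then ("fail", best.2)
    else if has_warning then ("warning", "none")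
    else ("pass", "none")

-- ===== PORT B =====
-- severities = {f.get("severity") for f in findings}; codes = {f.get("code","") for f in findings}
-- failure_type = next((k for k in _FAILURE_PRIORITY if k in codes), "none")
def classify_evaluation_failure_alt (findings : List (List (String × String))) : String × String :=
  if findings = [] then ("pass", "none")
  else
    let severities : PySem.Set (Option String) :=
      PySem.Set.ofList (findings.map (fun f => pvGet f "severity"))
    let codes : PySem.Set String :=
      PySem.Set.ofList (findings.map (fun f => pvGetD f "code" ""))
    let failure_type :=
      (failurePriority.keys.find? (fun k => PySem.Set.contains codes k)).getD "none"
    if PySem.Set.contains severities (some "error") then ("fail", failure_type)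
    else if PySem.Set.contains severities (some "warning") then ("warning", "none")
    else ("pass", "none")

-- ===== PRECONDITION & SPEC =====
def Spec_classify_evaluation_failure (findings : List (List (String × String))) (out : String × String) : Prop := out = classify_evaluation_failure_alt findings
instance (findings : List (List (String × String))) (out : String × String) : Decidable (Spec_classify_evaluation_failure findings out) := by unfold Spec_classify_evaluation_failure; infer_instance

-- ===== CLAIM (what is proved, stated in full; the proofs are below) =====
def Claim_equal_classify_evaluation_failure : Prop := ∀ (findings : List (List (String × String))), Dom_classify_evaluation_failure findings → Spec_classify_evaluation_failure findings (classify_evaluation_failure findings)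

-- ===== LEMMAS AND PROOFS =====

-- proof-side abbreviations
def pvP (c : String) : Int := failurePriority.getD c 99

def pvG (s : Int × String) (c : String) : Int × String :=
  if pvP c < s.1 then (pvP c, c) else s

-- A routes the code through the identity dict codeToFailure before the priority lookup;
-- the direct lookup agrees in priority for every string.
theorem prio_through_codeToFailure (code : String) :
    failurePriority.getD (codeToFailure.getD code "none") 99 = pvP code := by
  by_cases h1 : "missing_output_file" = code
  · subst h1; decide
  by_cases h2 : "malformed_json" = code
  · subst h2; decide
  by_cases h3 : "schema_invalid" = code
  · subst h3; decide
  by_cases h4 : "normalization_error" = code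
  · subst h4; decide
  by_cases h5 : "unsupported_study_type" = code
  · subst h5; decide
  by_cases h6 : "invalid_threshold_definition" = code
  · subst h6; decide
  by_cases h7 : "missing_required_metric" = code
  · subst h7; decide
  by_cases h8 : "semantic_incomplete" = code
  · subst h8; decide
  by_cases h9 : "none" = code
  · subst h9; decide
  simp [failurePriority, codeToFailure, pvP, PySem.Dict.getD_eq_get?_getD,
    PySem.Dict.get?, h1, h2, h3, h4, h5, h6, h7, h8, h9]

-- when the priority is below 99 the code is a known one, so codeToFailure is the identity on it
theorem ft_eq_code_of_lt (code : String) (h : pvP code < 99) :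
    codeToFailure.getD code "none" = code := by
  by_cases h1 : "missing_output_file" = code
  · subst h1; decide
  by_cases h2 : "malformed_json" = code
  · subst h2; decide
  by_cases h3 : "schema_invalid" = code
  · subst h3; decide
  by_cases h4 : "normalization_error" = code
  · subst h4; decide
  by_cases h5 : "unsupported_study_type" = code
  · subst h5; decide
  by_cases h6 : "invalid_threshold_definition" = code
  · subst h6; decide
  by_cases h7 : "missing_required_metric" = code
  · subst h7; decide
  by_cases h8 : "semantic_incomplete" = code
  · subst h8; decide
  by_cases h9 : "none" = code
  · subst h9; decide
  exfalso
  have h99 : pvP code = 99 := by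
    simp [failurePriority, pvP, PySem.Dict.getD_eq_get?_getD, PySem.Dict.get?, h1, h2, h3, h4, h5, h6, h7, h8, h9]
  omega

theorem mem_keys_of_P_lt (c : String) (h : pvP c < 99) : c ∈ failurePriority.keys := by
  by_cases h1 : "missing_output_file" = c
  · subst h1; decide
  by_cases h2 : "malformed_json" = c
  · subst h2; decide
  by_cases h3 : "schema_invalid" = c
  · subst h3; decide
  by_cases h4 : "normalization_error" = c
  · subst h4; decide
  by_cases h5 : "unsupported_study_type" = c
  · subst h5; decide
  by_cases h6 : "invalid_threshold_definition" = c
  · subst h6; decide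
  by_cases h7 : "missing_required_metric" = c
  · subst h7; decide
  by_cases h8 : "semantic_incomplete" = c
  · subst h8; decide
  by_cases h9 : "none" = c
  · subst h9; decide
  exfalso
  have h99 : pvP c = 99 := by
    simp [failurePriority, pvP, PySem.Dict.getD_eq_get?_getD, PySem.Dict.get?, h1, h2, h3, h4, h5, h6, h7, h8, h9]
  omega

theorem keys_pairwise : failurePriority.keys.Pairwise (fun a b => pvP a < pvP b) := by
  decide

theorem none_of_not_lt (k : String) (hk : k ∈ failurePriority.keys) (h : ¬ pvP k < 99) :
    k = "none" := by
  fin_cases hk <;> first | rfl | (exfalso; exact h (by decide))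

-- A's fold over findings is the fold of pvG over the code list
theorem foldA_eq_foldg (findings : List (List (String × String))) :
    ∀ s : Int × String, s.1 ≤ 99 →
    findings.foldl bestStepA s =
      (findings.map (fun f => pvGetD f "code" "")).foldl pvG s := by
  induction findings with
  | nil => intro s _; rfl
  | cons f t ih =>
    intro s hs
    have hstep : bestStepA s f = pvG s (pvGetD f "code" "") := by
      simp only [bestStepA, pvG, prio_through_codeToFailure]
      split
      · rename_i hlt
        rw [ft_eq_code_of_lt _ (lt_of_lt_of_le hlt hs)]
      · rfl
    have hle : (pvG s (pvGetD f "code" "")).1 ≤ 99 := by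
      unfold pvG; split
      · rename_i hlt; exact le_of_lt (lt_of_lt_of_le hlt hs)
      · exact hs
    simp only [List.foldl_cons, List.map_cons, hstep]
    exact ih _ hle

theorem fold_g_spec (codes : List String) :
    ∀ p0 : Int, ∀ ft0 : String,
    (codes.foldl pvG (p0, ft0)).1 ≤ p0 ∧
    (∀ c ∈ codes, (codes.foldl pvG (p0, ft0)).1 ≤ pvP c) ∧
    (((codes.foldl pvG (p0, ft0)).1 < p0 ∧ (codes.foldl pvG (p0, ft0)).2 ∈ codes ∧
       pvP (codes.foldl pvG (p0, ft0)).2 = (codes.foldl pvG (p0, ft0)).1) ∨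
      codes.foldl pvG (p0, ft0) = (p0, ft0)) := by
  induction codes with
  | nil => intro p0 ft0; simp
  | cons c t ih =>
    intro p0 ft0
    by_cases hlt : pvP c < p0
    · have hg : pvG (p0, ft0) c = (pvP c, c) := by simp [pvG, hlt]
      obtain ⟨h1, h2, h3⟩ := ih (pvP c) c
      refine ⟨?_, ?_, ?_⟩
      · simp only [List.foldl_cons, hg]; omega
      · intro d hd
        rcases List.mem_cons.mp hd with hd | hd
        · subst hd; simp only [List.foldl_cons, hg]; omega
        · simp only [List.foldl_cons, hg]; exact h2 d hd
      · rcases h3 with ⟨ha, hb, hc⟩ | heq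
        · left
          refine ⟨?_, ?_, ?_⟩ <;> simp only [List.foldl_cons, hg]
          · omega
          · exact List.mem_cons_of_mem _ hb
          · exact hc
        · left
          simp only [List.foldl_cons, hg, heq]
          exact ⟨hlt, by simp, by simp⟩
    · have hg : pvG (p0, ft0) c = (p0, ft0) := by simp [pvG, hlt]
      obtain ⟨h1, h2, h3⟩ := ih p0 ft0
      refine ⟨?_, ?_, ?_⟩
      · simp only [List.foldl_cons, hg]; exact h1
      · intro d hd
        rcases List.mem_cons.mp hd with hd | hd
        · subst hd; simp only [List.foldl_cons, hg]; omega
        · simp only [List.foldl_cons, hg]; exact h2 d hd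
      · simp only [List.foldl_cons, hg]
        rcases h3 with ⟨ha, hb, hc⟩ | heq
        · exact Or.inl ⟨ha, List.mem_cons_of_mem _ hb, hc⟩
        · exact Or.inr heq

theorem find?_first_min {α : Type} (f : α → Int) (pred : α → Bool) (ks : List α)
    (hs : ks.Pairwise (fun a b => f a < f b)) (bft : α) (hmem : bft ∈ ks)
    (hpred : pred bft = true) (hmin : ∀ k ∈ ks, pred k = true → f bft ≤ f k) :
    ks.find? pred = some bft := by
  induction ks with
  | nil => cases hmem
  | cons h t ih =>
    rw [List.pairwise_cons] at hs
    by_cases hp : pred h = true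
    · simp only [List.find?_cons, hp]
      rcases List.mem_cons.mp hmem with rfl | hmem
      · rfl
      · exfalso
        have h1 : f h < f bft := hs.1 bft hmem
        have h2 : f bft ≤ f h := hmin h List.mem_cons_self hp
        omega
    · rw [List.find?_cons]
      simp only [hp]
      rcases List.mem_cons.mp hmem with rfl | hmem
      · exact absurd hpred hp
      · exact ih hs.2 hmem (fun k hk => hmin k (List.mem_cons_of_mem _ hk))

theorem sev_contains_eq_any (findings : List (List (String × String))) (v : String) :
    PySem.Set.contains (PySem.Set.ofList (findings.map (fun f => pvGet f "severity"))) (some v) =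
      findings.any (fun f => pvGet f "severity" == some v) := by
  rw [Bool.eq_iff_iff]
  simp [PySem.Set.mem_ofList, List.any_eq_true]

theorem failure_type_eq (findings : List (List (String × String))) :
    (failurePriority.keys.find? (fun k =>
        PySem.Set.contains (PySem.Set.ofList (findings.map (fun f => pvGetD f "code" ""))) k)).getD "none" =
      (findings.foldl bestStepA (99, "none")).2 := by
  rw [foldA_eq_foldg findings (99, "none") (by norm_num)]
  obtain ⟨h1, h2, h3⟩ := fold_g_spec (findings.map (fun f => pvGetD f "code" "")) 99 "none"
  set codes := findings.map (fun f => pvGetD f "code" "") with hcodes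
  set r := codes.foldl pvG (99, "none") with hr
  have hpred : ∀ k, (PySem.Set.contains (PySem.Set.ofList codes) k = true) ↔ k ∈ codes := by
    intro k
    rw [PySem.Set.contains_iff, PySem.Set.mem_ofList]
  rcases h3 with ⟨ha, hb, hc⟩ | heq
  · have hfind : failurePriority.keys.find?
        (fun k => PySem.Set.contains (PySem.Set.ofList codes) k) = some r.2 := by
      apply find?_first_min pvP _ _ keys_pairwise
      · exact mem_keys_of_P_lt _ (by rw [hc]; omega)
      · exact (hpred r.2).mpr hb
      · intro k _ hk
        rw [hc]
        exact h2 k ((hpred k).mp hk)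
    rw [hfind]
    rfl
  · rw [heq]
    cases hf : failurePriority.keys.find?
        (fun k => PySem.Set.contains (PySem.Set.ofList codes) k) with
    | none => rfl
    | some k =>
      have hkmem : k ∈ failurePriority.keys := List.mem_of_find?_eq_some hf
      have hkp : PySem.Set.contains (PySem.Set.ofList codes) k = true := List.find?_some hf
      have hk99 : (99 : Int) ≤ pvP k := by
        have := h2 k ((hpred k).mp hkp)
        rw [heq] at this
        exact this
      have : k = "none" := none_of_not_lt k hkmem (by omega)
      rw [this]
      rfl

-- ===== VERDICT (by name: the statement is the Claim_ definition above) =====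
theorem classify_evaluation_failure_spec : Claim_equal_classify_evaluation_failure := by
  intro findings _
  unfold Spec_classify_evaluation_failure
  by_cases h : findings = []
  · simp [classify_evaluation_failure, classify_evaluation_failure_alt, h]
  · simp only [classify_evaluation_failure, classify_evaluation_failure_alt, h, if_false]
    rw [sev_contains_eq_any, sev_contains_eq_any, failure_type_eq]
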